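-- pv_equiv track=rewrite | github.com/milahu/opensubtitles-scraper | opensubtitles_dump_client/filevercmp.py | file_prefixlen
-- ===== SOURCE A (Python) =====
-- def file_prefixlen(s):
--     """
--     Return the length of a prefix of S that corresponds to the suffix
--     defined by this extended regular expression in the C locale:
--         (\.[A-Za-z~][A-Za-z0-9~]*)*$
--     Use the longest suffix matching this regular expression,
--     except do not use all of S as a suffix if S is nonempty.
--     """
--     # not:
--     #If *LEN is -1, S is a string; set *LEN to S's length.
--     #Otherwise, *LEN should be nonnegative, S is a char array,
--     #and *LEN does not change.
--
--     #size_t n = *len;  /* SIZE_MAX if N == -1.  */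
--     n = len(s)
--     #idx_t prefixlen = 0;
--     prefixlen = 0
--
--     #for (idx_t i = 0; ; )
--     i = 0
--     while True:
--         # "len = -1" is not used
--         #if (*len < 0 ? !s[i] : i == n)
--         if i == n: # end of string
--             #*len = i;
--             #return prefixlen;
--             return prefixlen
--
--         #i++;
--         i += 1
--         #prefixlen = i;
--         prefixlen = i
--         #while (i + 1 < n && s[i] == '.' && (c_isalpha (s[i + 1])
--         #                                    || s[i + 1] == '~'))
--         # seek to start of extension
--         while (
--             i + 1 < n and
--             s[i] == '.' and
--             (s[i + 1].isalpha() or s[i + 1] == '~')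
--         ):
--             # seek to end of extension
--             #for (i += 2; i < n and (c_isalnum (s[i]) or s[i] == '~'); i++)
--             i += 2
--             while i < n and (s[i].isalnum() or s[i] == '~'):
--                 i += 1
-- ===== SOURCE B (Python) =====
-- def file_prefixlen(s):
--     n = len(s)
--     if n == 0:
--         return 0
--
--     def is_ext_sequence(k):
--         # is s[k:] a concatenation of groups  "." [alpha~] [alnum~]*  ?
--         i = k
--         while i < n:
--             if s[i] != '.' or i + 1 >= n or not (s[i + 1].isalpha() or s[i + 1] == '~'):
--                 return False
--             i += 2
--             while i < n and (s[i].isalnum() or s[i] == '~'):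
--                 i += 1
--         return True
--
--     for k in range(1, n):
--         if is_ext_sequence(k):
--             return k
--     return n
-- ===== Notes on version B (the rewrite author's own statement) =====
-- stated objective: simpler
-- what changed: A's single monotone scan carrying a mutable prefixlen across iterations is replaced by a stateless search: try each candidate prefix length k = 1..n and return the first k whose suffix s[k:] verifies as a concatenation of extension groups.
import Mathlib
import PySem

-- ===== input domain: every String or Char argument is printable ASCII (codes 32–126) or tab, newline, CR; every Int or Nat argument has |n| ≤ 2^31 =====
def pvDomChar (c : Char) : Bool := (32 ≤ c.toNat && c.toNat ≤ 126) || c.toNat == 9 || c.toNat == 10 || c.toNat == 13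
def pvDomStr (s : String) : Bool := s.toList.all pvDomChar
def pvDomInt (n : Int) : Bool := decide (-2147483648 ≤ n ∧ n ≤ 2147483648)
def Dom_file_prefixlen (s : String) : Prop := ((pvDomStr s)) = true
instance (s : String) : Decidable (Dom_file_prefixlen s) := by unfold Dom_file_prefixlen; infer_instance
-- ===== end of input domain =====

-- B replaces A's single monotone pass (with its carried `prefixlen` state) by per-candidate
-- suffix verification: return the first k ≥ 1 whose suffix s[k:] parses as extension groups
-- (objective: simpler — no cross-iteration state; not faster).

-- ===== PORT A =====
-- A's innermost loop: while i < n and (s[i].isalnum() or s[i] == '~'): i += 1  (returns final i)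
def pvArun (cs : List Char) (i : Nat) : Nat :=
  if i < cs.length ∧ (PySem.Chars.isalnum (cs.getD i ' ') = true ∨ cs.getD i ' ' = '~')
  then pvArun cs (i + 1)
  else i
termination_by cs.length - i
decreasing_by omega

theorem pvArun_ge (cs : List Char) (i : Nat) : i ≤ pvArun cs i := by
  unfold pvArun
  split
  · have := pvArun_ge cs (i + 1); omega
  · exact le_refl i
termination_by cs.length - i
decreasing_by omega

-- A's middle loop: while i+1 < n and s[i] == '.' and (s[i+1].isalpha() or s[i+1] == '~'):
--   i += 2; <innermost loop>      (index accesses are guarded in range, so List.getD is exact)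
def pvAseek (cs : List Char) (i : Nat) : Nat :=
  if i + 1 < cs.length ∧ cs.getD i ' ' = '.' ∧
     (PySem.Chars.isalpha (cs.getD (i + 1) ' ') = true ∨ cs.getD (i + 1) ' ' = '~')
  then pvAseek cs (pvArun cs (i + 2))
  else i
termination_by cs.length - i
decreasing_by have := pvArun_ge cs (i + 2); omega

theorem pvAseek_ge (cs : List Char) (i : Nat) : i ≤ pvAseek cs i := by
  unfold pvAseek
  split
  · rename_i h
    have h1 := pvArun_ge cs (i + 2)
    have h2 := pvAseek_ge cs (pvArun cs (i + 2))
    omega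
  · exact le_refl i
termination_by cs.length - i
decreasing_by have := pvArun_ge cs (i + 2); omega

theorem pvArun_le (cs : List Char) (i : Nat) (h : i ≤ cs.length) : pvArun cs i ≤ cs.length := by
  unfold pvArun
  split
  · rename_i hc; exact pvArun_le cs (i + 1) (by omega)
  · exact h
termination_by cs.length - i
decreasing_by omega

theorem pvAseek_le (cs : List Char) (i : Nat) (h : i ≤ cs.length) : pvAseek cs i ≤ cs.length := by
  unfold pvAseek
  split
  · rename_i hc
    exact pvAseek_le cs (pvArun cs (i + 2)) (pvArun_le cs (i + 2) (by omega))
  · exact h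
termination_by cs.length - i
decreasing_by have := pvArun_ge cs (i + 2); omega

-- A's outer loop; state (i, prefixlen); the invariant i ≤ n (established by pvAseek_le) is
-- carried as an argument so that Python's `i == n` test is ported verbatim.
def pvAouter (cs : List Char) (i : Nat) (prefixlen : Nat) (h : i ≤ cs.length) : Nat :=
  if hn : i = cs.length then prefixlen
  else pvAouter cs (pvAseek cs (i + 1)) (i + 1)
         (pvAseek_le cs (i + 1) (by omega))
termination_by cs.length - i
decreasing_by have := pvAseek_ge cs (i + 1); omega

def file_prefixlen (s : String) : Int :=
  (pvAouter s.toList 0 0 (Nat.zero_le _) : Int)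

-- ===== PORT B =====
-- B's run consumer: while i < n and (s[i].isalnum() or s[i] == '~'): i += 1
def pvBconsume (cs : List Char) (i : Nat) : Nat :=
  if i < cs.length ∧ (PySem.Chars.isalnum (cs.getD i ' ') = true ∨ cs.getD i ' ' = '~')
  then pvBconsume cs (i + 1)
  else i
termination_by cs.length - i
decreasing_by omega

theorem pvBconsume_ge (cs : List Char) (i : Nat) : i ≤ pvBconsume cs i := by
  unfold pvBconsume
  split
  · have := pvBconsume_ge cs (i + 1); omega
  · exact le_refl i
termination_by cs.length - i
decreasing_by omega

-- is_ext_sequence(k): does s[k:] parse as a concatenation of groups "." [alpha~] [alnum~]* ?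
def pvBisExt (cs : List Char) (i : Nat) : Bool :=
  if i < cs.length then
    if cs.getD i ' ' = '.' ∧ i + 1 < cs.length ∧
       (PySem.Chars.isalpha (cs.getD (i + 1) ' ') = true ∨ cs.getD (i + 1) ' ' = '~')
    then pvBisExt cs (pvBconsume cs (i + 2))
    else false
  else true
termination_by cs.length - i
decreasing_by have := pvBconsume_ge cs (i + 2); omega

-- for k in range(1, n): if is_ext_sequence(k): return k;  return n
def pvBfind (cs : List Char) (k : Nat) : Nat :=
  if cs.length ≤ k then cs.length
  else if pvBisExt cs k then k else pvBfind cs (k + 1)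
termination_by cs.length - k
decreasing_by omega

def file_prefixlen_alt (s : String) : Int :=
  if s.toList.length = 0 then 0 else (pvBfind s.toList 1 : Int)

-- ===== PRECONDITION & SPEC =====
def Spec_file_prefixlen (s : String) (out : Int) : Prop := out = file_prefixlen_alt s
instance (s : String) (out : Int) : Decidable (Spec_file_prefixlen s out) := by unfold Spec_file_prefixlen; infer_instance

-- ===== CLAIM (what is proved, stated in full; the proofs are below) =====
def Claim_equal_file_prefixlen : Prop := ∀ (s : String), Dom_file_prefixlen s → Spec_file_prefixlen s (file_prefixlen s)

-- ===== LEMMAS AND PROOFS =====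

theorem pvRun_eq (cs : List Char) (i : Nat) : pvArun cs i = pvBconsume cs i := by
  rw [pvArun, pvBconsume]
  split_ifs with h
  · exact pvRun_eq cs (i + 1)
  · rfl
termination_by cs.length - i
decreasing_by omega

-- every character strictly consumed by pvArun is alnum-or-'~'
theorem pvArun_mem (cs : List Char) (i k : Nat) (h1 : i ≤ k) (h2 : k < pvArun cs i) :
    PySem.Chars.isalnum (cs.getD k ' ') = true ∨ cs.getD k ' ' = '~' := by
  rw [pvArun] at h2
  split at h2
  · rename_i hc
    rcases Nat.eq_or_lt_of_le h1 with he | hl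
    · subst he; exact hc.2
    · exact pvArun_mem cs (i + 1) k hl h2
  · omega
termination_by cs.length - i
decreasing_by omega

theorem isalpha_ne_dot (c : Char) (h : PySem.Chars.isalpha c = true ∨ c = '~') : c ≠ '.' := by
  intro he; subst he
  rcases h with h | h
  · exact absurd h (by decide)
  · exact absurd h (by decide)

theorem isalnum_ne_dot (c : Char) (h : PySem.Chars.isalnum c = true ∨ c = '~') : c ≠ '.' := by
  intro he; subst he
  rcases h with h | h
  · exact absurd h (by decide)
  · exact absurd h (by decide)

-- B's verifier succeeds exactly where A's greedy consumption reaches the end of the string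
theorem pvBisExt_iff_seek (cs : List Char) (i : Nat) (h : i ≤ cs.length) :
    pvBisExt cs i = true ↔ pvAseek cs i = cs.length := by
  rw [pvBisExt, pvAseek]
  by_cases hlt : i < cs.length
  · rw [if_pos hlt]
    by_cases hc : i + 1 < cs.length ∧ cs.getD i ' ' = '.' ∧
        (PySem.Chars.isalpha (cs.getD (i + 1) ' ') = true ∨ cs.getD (i + 1) ' ' = '~')
    · rw [if_pos hc, if_pos ⟨hc.2.1, hc.1, hc.2.2⟩]
      rw [← pvRun_eq]
      exact pvBisExt_iff_seek cs (pvArun cs (i + 2)) (pvArun_le cs (i + 2) (by omega))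
    · have hc' : ¬ (cs.getD i ' ' = '.' ∧ i + 1 < cs.length ∧
          (PySem.Chars.isalpha (cs.getD (i + 1) ' ') = true ∨ cs.getD (i + 1) ' ' = '~')) := by
        intro ⟨a, b, c⟩; exact hc ⟨b, a, c⟩
      rw [if_neg hc, if_neg hc']
      simp; omega
  · have : i = cs.length := by omega
    rw [if_neg hlt, if_neg (by omega : ¬ (i + 1 < cs.length ∧ cs.getD i ' ' = '.' ∧
      (PySem.Chars.isalpha (cs.getD (i + 1) ' ') = true ∨ cs.getD (i + 1) ' ' = '~')))]
    simp [this]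
termination_by cs.length - i
decreasing_by have := pvArun_ge cs (i + 2); omega

-- positions strictly inside a failed greedy parse cannot themselves start a full suffix parse
theorem pvAseek_absorb (cs : List Char) (i : Nat) (hstuck : pvAseek cs i < cs.length) :
    ∀ k, i < k → k ≤ pvAseek cs i → pvAseek cs k < cs.length := by
  intro k hik hki
  by_cases hc : i + 1 < cs.length ∧ cs.getD i ' ' = '.' ∧
      (PySem.Chars.isalpha (cs.getD (i + 1) ' ') = true ∨ cs.getD (i + 1) ' ' = '~')
  · rw [pvAseek, if_pos hc] at hstuck hki
    obtain ⟨h1, h2, h3⟩ := hc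
    have hm2 : i + 2 ≤ pvArun cs (i + 2) := pvArun_ge cs (i + 2)
    have hmseek : pvArun cs (i + 2) ≤ pvAseek cs (pvArun cs (i + 2)) :=
      pvAseek_ge cs (pvArun cs (i + 2))
    rcases Nat.lt_or_ge k (pvArun cs (i + 2)) with hkm | hkm
    · -- k strictly before the next group start
      rcases Nat.eq_or_lt_of_le hik with he | hl
      · -- k = i + 1 : an alpha/'~' character, not '.'
        rw [← he]
        rw [pvAseek, if_neg (fun hcc => isalpha_ne_dot _ h3 hcc.2.1)]
        omega
      · -- i + 2 ≤ k < pvArun cs (i + 2) : a character consumed by the run, not '.'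
        have hal := pvArun_mem cs (i + 2) k (by omega) (by omega)
        rw [pvAseek, if_neg (fun hcc => isalnum_ne_dot _ hal hcc.2.1)]
        omega
    · rcases Nat.eq_or_lt_of_le hkm with he | hl
      · exact he ▸ hstuck
      · exact pvAseek_absorb cs (pvArun cs (i + 2)) hstuck k hl hki
  · rw [pvAseek, if_neg hc] at hki
    omega
termination_by cs.length - i
decreasing_by have := pvArun_ge cs (i + 2); omega

-- pvBfind skips over a block of failing candidates
theorem pvBfind_skip (cs : List Char) (a b : Nat) (hab : a ≤ b) (hb : b ≤ cs.length)
    (hfail : ∀ k, a ≤ k → k < b → pvBisExt cs k = false) : pvBfind cs a = pvBfind cs b := by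
  rcases Nat.eq_or_lt_of_le hab with he | hl
  · rw [he]
  · rw [pvBfind, if_neg (by omega), hfail a (le_refl a) hl]
    simp only [Bool.false_eq_true, if_false]
    exact pvBfind_skip cs (a + 1) b hl hb (fun k h1 h2 => hfail k (by omega) h2)
termination_by b - a

-- main invariant: A's outer loop from state (i, p) with i = greedy(p) returns B's first hit from p
theorem pvMain (cs : List Char) (i p : Nat) (hpi : p ≤ i) (hin : i ≤ cs.length)
    (hseek : pvAseek cs p = i) (h : i ≤ cs.length) :
    pvAouter cs i p h = pvBfind cs p := by
  rw [pvAouter]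
  by_cases hn : i = cs.length
  · rw [dif_pos hn]
    rw [pvBfind]
    by_cases hp : cs.length ≤ p
    · rw [if_pos hp]; omega
    · rw [if_neg hp]
      have : pvBisExt cs p = true := by
        rw [pvBisExt_iff_seek cs p (by omega), hseek, hn]
      rw [this]; simp
  · rw [dif_neg hn]
    have hstuck : pvAseek cs p < cs.length := by omega
    have hskip : pvBfind cs p = pvBfind cs (i + 1) := by
      apply pvBfind_skip cs p (i + 1) (by omega) (by omega)
      intro k h1 h2
      rw [← Bool.not_eq_true]
      intro hT
      have hkE := (pvBisExt_iff_seek cs k (by omega)).1 hT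
      rcases Nat.eq_or_lt_of_le h1 with he | hl
      · rw [← he] at hkE
        omega
      · have := pvAseek_absorb cs p hstuck k hl (by omega)
        omega
    rw [hskip]
    have hge := pvAseek_ge cs (i + 1)
    exact pvMain cs (pvAseek cs (i + 1)) (i + 1) hge
      (pvAseek_le cs (i + 1) (by omega)) rfl _
termination_by cs.length - i
decreasing_by have := pvAseek_ge cs (i + 1); omega

-- ===== VERDICT (by name: the statement is the Claim_ definition above) =====
theorem file_prefixlen_spec : Claim_equal_file_prefixlen := by
  intro s _
  unfold Spec_file_prefixlen file_prefixlen file_prefixlen_alt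
  by_cases hn : s.toList.length = 0
  · rw [if_pos hn, pvAouter, dif_pos (by omega)]
    rfl
  · rw [if_neg hn, pvAouter, dif_neg (by omega)]
    exact congrArg Int.ofNat
      (pvMain s.toList (pvAseek s.toList 1) 1 (pvAseek_ge s.toList 1)
        (pvAseek_le s.toList 1 (by omega)) rfl _)
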